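-- pv_equiv track=rewrite | github.com/karim-sharkawy/Coursework-Collection | CS177/Labs/lab11-Q2.py | calcListDiff
-- ===== SOURCE A (Python) =====
-- def calcListDiff (list1, list2):
--     counts = 0
--     list1 = set(list1)
--     list2 = set(list2)
--     for i in list1:
--         if i not in list2:
--             counts += 1
--     for i in list2:
--         if i not in list1:
--             counts += 1
--     return counts
-- ===== SOURCE B (Python) =====
-- def calcListDiff(list1, list2):
--     a = sorted(set(list1))
--     b = sorted(set(list2))
--     i = j = count = 0
--     while i < len(a) and j < len(b):
--         if a[i] < b[j]:
--             count += 1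
--             i += 1
--         elif b[j] < a[i]:
--             count += 1
--             j += 1
--         else:
--             i += 1
--             j += 1
--     return count + (len(a) - i) + (len(b) - j)
-- ===== Notes on version B (the rewrite author's own statement) =====
-- stated objective: alternative
-- what changed: Replaces the two membership-test loops with sort-then-merge: both deduplicated lists are sorted and a single two-pointer merge scan counts elements present on only one side, so no per-element membership test remains.
import Mathlib
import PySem

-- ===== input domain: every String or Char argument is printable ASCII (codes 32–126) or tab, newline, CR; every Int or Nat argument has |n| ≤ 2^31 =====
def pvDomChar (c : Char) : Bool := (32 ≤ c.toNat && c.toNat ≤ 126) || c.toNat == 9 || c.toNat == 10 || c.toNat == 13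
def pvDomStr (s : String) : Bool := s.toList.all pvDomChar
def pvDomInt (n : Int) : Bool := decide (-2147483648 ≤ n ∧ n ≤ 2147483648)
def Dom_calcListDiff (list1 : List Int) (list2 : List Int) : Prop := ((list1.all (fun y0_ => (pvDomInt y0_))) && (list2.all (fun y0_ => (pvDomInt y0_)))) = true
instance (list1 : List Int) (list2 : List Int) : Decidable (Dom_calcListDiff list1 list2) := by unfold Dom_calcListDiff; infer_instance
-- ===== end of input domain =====

-- B replaces A's two membership-test loops with sort-then-merge: sort both
-- deduplicated lists and count one-sided elements in a single two-pointer scan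
-- (objective: alternative algorithm, similar cost).


-- ===== PORT A =====
-- literal port of A: dedup both lists into sets, then two counting loops
-- (counts is a sum of per-element 0/1 contributions, so it does not depend
-- on Python's set iteration order)
def calcListDiff (list1 : List Int) (list2 : List Int) : Int :=
  let s1 : PySem.Set Int := PySem.Set.ofList list1
  let s2 : PySem.Set Int := PySem.Set.ofList list2
  let counts : Int := s1.foldl (fun c i => if PySem.Set.contains s2 i then c else c + 1) 0
  s2.foldl (fun c i => if PySem.Set.contains s1 i then c else c + 1) counts

-- ===== PORT B =====
-- the two-pointer merge scan of Source B's while loop, as recursion on the two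
-- sorted lists (i/j advance = dropping the head); the trailing
-- (len(a)-i)+(len(b)-j) is the length of the leftover list
def pvMerge : List Int → List Int → Int
  | [], ys => (ys.length : Int)
  | x :: xs, [] => ((x :: xs).length : Int)
  | x :: xs, y :: ys =>
    if x < y then 1 + pvMerge xs (y :: ys)
    else if y < x then 1 + pvMerge (x :: xs) ys
    else pvMerge xs ys

-- literal port of Source B: sorted(set(..)) on both lists, then the merge scan
def calcListDiff_alt (list1 : List Int) (list2 : List Int) : Int :=
  let a := PySem.List.sorted (PySem.Set.ofList list1) (fun x => x) false
  let b := PySem.List.sorted (PySem.Set.ofList list2) (fun x => x) false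
  pvMerge a b

-- ===== PRECONDITION & SPEC =====
def Spec_calcListDiff (list1 : List Int) (list2 : List Int) (out : Int) : Prop := out = calcListDiff_alt list1 list2
instance (list1 : List Int) (list2 : List Int) (out : Int) : Decidable (Spec_calcListDiff list1 list2 out) := by unfold Spec_calcListDiff; infer_instance

-- ===== CLAIM (what is proved, stated in full; the proofs are below) =====
def Claim_equal_calcListDiff : Prop := ∀ (list1 : List Int) (list2 : List Int), Dom_calcListDiff list1 list2 → Spec_calcListDiff list1 list2 (calcListDiff list1 list2)

-- ===== LEMMAS AND PROOFS =====

-- A's counting loop is a countP of the failing membership test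
theorem foldl_count_not_mem (p : Int → Bool) (a : List Int) (n : Int) :
    a.foldl (fun c i => if p i then c else c + 1) n
      = n + a.countP (fun i => !p i) := by
  induction a generalizing n with
  | nil => simp
  | cons x xs ih =>
    simp only [List.foldl_cons, List.countP_cons, ih]
    by_cases h : p x <;> simp [h] <;> omega

-- on strictly increasing lists, the merge scan counts exactly the elements
-- present on one side only
theorem pvMerge_eq_countP (a b : List Int)
    (ha : a.Pairwise (· < ·)) (hb : b.Pairwise (· < ·)) :
    pvMerge a b
      = (a.countP (fun x => !b.contains x) : Int)
        + (b.countP (fun y => !a.contains y) : Int) := by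
  induction a generalizing b with
  | nil =>
    induction b with
    | nil => simp [pvMerge]
    | cons y ys _ => simp [pvMerge, List.countP_cons]
  | cons x xs ihx =>
    induction b with
    | nil => simp [pvMerge, List.countP_cons]
    | cons y ys ihy =>
      have hxs : xs.Pairwise (· < ·) := ha.tail
      have hys : ys.Pairwise (· < ·) := hb.tail
      have hxlt : ∀ z ∈ xs, x < z := fun z hz => List.rel_of_pairwise_cons ha hz
      have hylt : ∀ z ∈ ys, y < z := fun z hz => List.rel_of_pairwise_cons hb hz
      by_cases hlt : x < y
      · -- x < y : x occurs nowhere in y :: ys, and no element of y :: ys equals x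
        have hxnot : ¬ x ∈ y :: ys := by
          intro hmem
          rcases List.mem_cons.mp hmem with h | h
          · omega
          · exact absurd (hylt x h) (by omega)
        have hcnt : (y :: ys).countP (fun z => !(x :: xs).contains z)
            = (y :: ys).countP (fun z => !xs.contains z) := by
          apply List.countP_congr
          intro z hz
          have hzx : z ≠ x := by
            rintro rfl; exact hxnot hz
          simp [List.contains_cons, hzx, Ne.symm hzx]
        rw [show pvMerge (x :: xs) (y :: ys) = 1 + pvMerge xs (y :: ys) by
              simp [pvMerge, hlt]]
        rw [ihx (y :: ys) hxs hb, hcnt]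
        have hxy' : ¬ x = y := by omega
        have hxys : x ∉ ys := fun h => absurd (hylt x h) (by omega)
        simp only [List.countP_cons]
        simp [hxy', hxys]
        push_cast
        ring
      · by_cases hgt : y < x
        · -- symmetric
          have hynot : ¬ y ∈ x :: xs := by
            intro hmem
            rcases List.mem_cons.mp hmem with h | h
            · omega
            · exact absurd (hxlt y h) (by omega)
          have hcnt : (x :: xs).countP (fun z => !(y :: ys).contains z)
              = (x :: xs).countP (fun z => !ys.contains z) := by
            apply List.countP_congr
            intro z hz
            have hzy : z ≠ y := by
              rintro rfl; exact hynot hz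
            simp [List.contains_cons, hzy, Ne.symm hzy]
          rw [show pvMerge (x :: xs) (y :: ys) = 1 + pvMerge (x :: xs) ys by
                simp [pvMerge, hlt, hgt]]
          rw [ihy hys, hcnt]
          have hyx' : ¬ y = x := by omega
          have hyxs : y ∉ xs := fun h => hynot (List.mem_cons_of_mem _ h)
          simp only [List.countP_cons]
          simp [hyx', hyxs]
          push_cast
          ring
        · -- x = y : both heads matched, drop both
          have hxy : x = y := by omega
          subst hxy
          have hx_xs : x ∉ xs := fun h => absurd (hxlt x h) (by omega)
          have hx_ys : x ∉ ys := fun h => absurd (hylt x h) (by omega)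
          have hc1 : xs.countP (fun z => !(x :: ys).contains z)
              = xs.countP (fun z => !ys.contains z) := by
            apply List.countP_congr
            intro z hz
            have hzx : z ≠ x := fun h => hx_xs (h ▸ hz)
            simp [List.contains_cons, hzx, Ne.symm hzx]
          have hc2 : ys.countP (fun z => !(x :: xs).contains z)
              = ys.countP (fun z => !xs.contains z) := by
            apply List.countP_congr
            intro z hz
            have hzx : z ≠ x := fun h => hx_ys (h ▸ hz)
            simp [List.contains_cons, hzx, Ne.symm hzx]
          rw [show pvMerge (x :: xs) (x :: ys) = pvMerge xs ys by
                simp [pvMerge]]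
          rw [ihx ys hxs hys]
          simp only [List.countP_cons]
          rw [hc1, hc2]
          simp

-- countP of a membership test only depends on the lists up to permutation
theorem countP_not_contains_perm {a a' b b' : List Int}
    (hpa : a'.Perm a) (hpb : b'.Perm b) :
    a'.countP (fun x => !b'.contains x) = a.countP (fun x => !b.contains x) := by
  rw [hpa.countP_eq]
  apply List.countP_congr
  intro z _
  have : (b'.contains z) = (b.contains z) := by
    simp only [List.contains_eq_mem]
    exact decide_eq_decide.mpr hpb.mem_iff
  rw [this]

-- ===== VERDICT (by name: the statement is the Claim_ definition above) =====
theorem calcListDiff_spec : Claim_equal_calcListDiff := by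
  intro list1 list2 _
  unfold Spec_calcListDiff calcListDiff calcListDiff_alt
  set s1 : List Int := PySem.Set.ofList list1 with hs1
  set s2 : List Int := PySem.Set.ofList list2 with hs2
  have hpa : (PySem.List.sorted s1 (fun x : Int => x) false).Perm s1 :=
    PySem.List.sorted_perm s1 (fun x : Int => x) false
  have hpb : (PySem.List.sorted s2 (fun x : Int => x) false).Perm s2 :=
    PySem.List.sorted_perm s2 (fun x : Int => x) false
  have hapw : (PySem.List.sorted s1 (fun x : Int => x) false).Pairwise (· < ·) := by
    rw [hs1]; exact PySem.List.sorted_ofList_pairwise_lt (xs := list1)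
  have hbpw : (PySem.List.sorted s2 (fun x : Int => x) false).Pairwise (· < ·) := by
    rw [hs2]; exact PySem.List.sorted_ofList_pairwise_lt (xs := list2)
  show List.foldl (fun c i => if PySem.Set.contains s1 i then c else c + 1)
      (List.foldl (fun c i => if PySem.Set.contains s2 i then c else c + 1) 0 s1) s2
    = pvMerge (PySem.List.sorted s1 (fun x : Int => x) false)
        (PySem.List.sorted s2 (fun x : Int => x) false)
  rw [foldl_count_not_mem (PySem.Set.contains s2),
      foldl_count_not_mem (PySem.Set.contains s1),
      pvMerge_eq_countP _ _ hapw hbpw]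
  simp only [PySem.Set.contains]
  rw [countP_not_contains_perm hpa hpb,
      countP_not_contains_perm hpb hpa]
  push_cast
  ring
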